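-- pv_equiv track=rewrite | github.com/wikilife-org/wikilife_biz | wikilife_biz/services/user/timeline_service.py | _process_complaint_daily_stat
-- ===== SOURCE A (Python) =====
-- def _process_complaint_daily_stat(complaint_reports):
--     complaint_dict = {}
--
--     if complaint_reports:
--         log_count = 0
--         aux_date = complaint_reports[0]["date"]
--         complaint_dict[aux_date] = {}
--
--         for report in complaint_reports:
--
--             if report["date"] != aux_date:
--                 complaint_dict[aux_date]["log_count"] = log_count
--                 aux_date = report["date"]
--
--                 log_count = 0
--                 complaint_dict[aux_date] = {}
--
--             log_count = log_count + 1
--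
--         complaint_dict[aux_date]["log_count"] = log_count
--     return complaint_dict
-- ===== SOURCE B (Python) =====
-- def _process_complaint_daily_stat(complaint_reports):
--     result = {}
--     i = 0
--     n = len(complaint_reports)
--     while i < n:
--         date = complaint_reports[i]["date"]
--         j = i + 1
--         while j < n and complaint_reports[j]["date"] == date:
--             j += 1
--         result[date] = {"log_count": j - i}
--         i = j
--     return result
-- ===== Notes on version B (the rewrite author's own statement) =====
-- stated objective: alternative
-- what changed: Replaces A's single-pass state machine (running counter, aux_date, pre-created empty inner dicts patched later) with run-length grouping: an outer index loop that finds each maximal run of equal consecutive dates with an inner scan and writes its count in one dict assignment.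
import Mathlib
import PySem

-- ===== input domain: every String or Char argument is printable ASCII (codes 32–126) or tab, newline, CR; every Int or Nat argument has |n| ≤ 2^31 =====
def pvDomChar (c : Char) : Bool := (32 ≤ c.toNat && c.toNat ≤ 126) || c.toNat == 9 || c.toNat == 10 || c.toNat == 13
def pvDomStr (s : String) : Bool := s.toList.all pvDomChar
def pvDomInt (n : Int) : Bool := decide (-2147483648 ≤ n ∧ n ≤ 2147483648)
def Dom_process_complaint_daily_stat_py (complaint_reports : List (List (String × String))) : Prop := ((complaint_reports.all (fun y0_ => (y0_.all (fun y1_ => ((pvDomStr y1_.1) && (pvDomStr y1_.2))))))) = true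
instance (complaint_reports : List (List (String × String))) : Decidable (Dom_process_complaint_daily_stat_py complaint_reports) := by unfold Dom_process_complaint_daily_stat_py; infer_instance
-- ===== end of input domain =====

-- B groups consecutive equal dates by scanning out each run with an index pair, instead of A's
-- single-pass state machine; return values are proved equal wherever A does not raise.

-- report["date"] (first-match association-list lookup); total via getD, exact inside Pre_
def pvKey (r : List (String × String)) : String :=
  ((PySem.Dict.mk r).get? "date").getD ""

-- ===== PORT A =====
def pvStepA (s : PySem.Dict String (PySem.Dict String Int) × Int × String)
    (report : List (String × String)) :
    PySem.Dict String (PySem.Dict String Int) × Int × String :=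
  let (dict, log_count, aux_date) := s
  if pvKey report ≠ aux_date then
    -- complaint_dict[aux_date]["log_count"] = log_count  (in-place overwrite keeps position)
    let dict := dict.insert aux_date ((dict.getD aux_date PySem.Dict.empty).insert "log_count" log_count)
    let aux_date := pvKey report
    let dict := dict.insert aux_date PySem.Dict.empty
    (dict, (0 : Int) + 1, aux_date)
  else
    (dict, log_count + 1, aux_date)

def process_complaint_daily_stat_py (complaint_reports : List (List (String × String))) :
    List (String × List (String × Int)) :=
  match complaint_reports with
  | [] => []
  | r0 :: _ =>
    let aux_date := pvKey r0
    let complaint_dict : PySem.Dict String (PySem.Dict String Int) :=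
      PySem.Dict.empty.insert aux_date PySem.Dict.empty
    let res := complaint_reports.foldl pvStepA (complaint_dict, (0 : Int), aux_date)
    let complaint_dict := res.1.insert res.2.2 ((res.1.getD res.2.2 PySem.Dict.empty).insert "log_count" res.2.1)
    complaint_dict.items.map (fun p => (p.1, p.2.items))

-- ===== PORT B =====
-- outer while: one entry per maximal run of equal consecutive dates, with its length (j - i)
def pvRuns : List (List (String × String)) → List (String × Int)
  | [] => []
  | r :: rest =>
    let d := pvKey r
    let run := rest.takeWhile (fun x => pvKey x == d)
    let rest' := rest.dropWhile (fun x => pvKey x == d)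
    (d, 1 + (run.length : Int)) :: pvRuns rest'
termination_by l => l.length
decreasing_by
  simpa using Nat.lt_succ_of_le (List.length_dropWhile_le _ _)

def process_complaint_daily_stat_py_alt (complaint_reports : List (List (String × String))) :
    List (String × List (String × Int)) :=
  ((pvRuns complaint_reports).foldl
      (fun (d : PySem.Dict String (PySem.Dict String Int)) p =>
        d.insert p.1 (PySem.Dict.empty.insert "log_count" p.2))
      PySem.Dict.empty).items.map (fun p => (p.1, p.2.items))

-- ===== PRECONDITION & SPEC =====
-- Pre_ excludes exactly the inputs where some report lacks a "date" key, on which A raises KeyError.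
def Pre_process_complaint_daily_stat_py (complaint_reports : List (List (String × String))) : Prop :=
  complaint_reports.all (fun r => ((PySem.Dict.mk r).get? "date").isSome) = true
instance (complaint_reports : List (List (String × String))) : Decidable (Pre_process_complaint_daily_stat_py complaint_reports) := by unfold Pre_process_complaint_daily_stat_py; infer_instance

def pvWitness_process_complaint_daily_stat_py : (List (List (String × String))) :=
  [[("date", "2020-01-01")], [("date", "2020-01-01")], [("date", "2020-01-02")]]

def Spec_process_complaint_daily_stat_py (complaint_reports : List (List (String × String))) (out : List (String × List (String × Int))) : Prop := out = process_complaint_daily_stat_py_alt complaint_reports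
instance (complaint_reports : List (List (String × String))) (out : List (String × List (String × Int))) : Decidable (Spec_process_complaint_daily_stat_py complaint_reports out) := by unfold Spec_process_complaint_daily_stat_py; infer_instance

-- ===== CLAIM (what is proved, stated in full; the proofs are below) =====
def Claim_equal_process_complaint_daily_stat_py : Prop := ∀ (complaint_reports : List (List (String × String))), Dom_process_complaint_daily_stat_py complaint_reports → Pre_process_complaint_daily_stat_py complaint_reports → Spec_process_complaint_daily_stat_py complaint_reports (process_complaint_daily_stat_py complaint_reports)

-- ===== LEMMAS AND PROOFS =====

-- A's fold from a state whose current date still maps to {}, followed by the final commit,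
-- equals B's run-folding after the pending run is absorbed into the running count.
theorem pvFoldA_eq (rs : List (List (String × String)))
    (dict : PySem.Dict String (PySem.Dict String Int)) (lc : Int) (aux : String)
    (h : dict.getD aux PySem.Dict.empty = PySem.Dict.empty) :
    (let res := rs.foldl pvStepA (dict, lc, aux)
     res.1.insert res.2.2 ((res.1.getD res.2.2 PySem.Dict.empty).insert "log_count" res.2.1)) =
    (pvRuns (rs.dropWhile (fun x => pvKey x == aux))).foldl
      (fun (d : PySem.Dict String (PySem.Dict String Int)) p =>
        d.insert p.1 (PySem.Dict.empty.insert "log_count" p.2))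
      (dict.insert aux (PySem.Dict.empty.insert "log_count"
        (lc + ((rs.takeWhile (fun x => pvKey x == aux)).length : Int)))) := by
  induction rs generalizing dict lc aux with
  | nil => simp [h, pvRuns]
  | cons r rs' ih =>
    by_cases hk : pvKey r = aux
    · have hb : (pvKey r == aux) = true := by simp [hk]
      have hstep : pvStepA (dict, lc, aux) r = (dict, lc + 1, aux) := by
        simp [pvStepA, hk]
      simp only [List.takeWhile_cons, List.dropWhile_cons, hb, if_true,
        List.foldl_cons, hstep]
      rw [ih dict (lc + 1) aux h, List.length_cons]
      congr 3
      push_cast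
      ring
    · have hb : (pvKey r == aux) = false := by simp [hk]
      have hstep : pvStepA (dict, lc, aux) r =
          ((dict.insert aux (PySem.Dict.empty.insert "log_count" lc)).insert (pvKey r) PySem.Dict.empty,
            (0 : Int) + 1, pvKey r) := by
        simp [pvStepA, hk, h]
      simp only [List.takeWhile_cons, List.dropWhile_cons, hb, if_false, Bool.false_eq_true,
        List.foldl_cons, hstep]
      rw [ih _ ((0 : Int) + 1) (pvKey r) (PySem.Dict.getD_insert_self _ _ _ _)]
      rw [pvRuns]
      simp only [List.foldl_cons, PySem.Dict.insert_insert_self, List.length_nil,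
        Nat.cast_zero, add_zero, zero_add]

theorem process_complaint_daily_stat_py_eq_alt (rs : List (List (String × String))) :
    process_complaint_daily_stat_py rs = process_complaint_daily_stat_py_alt rs := by
  cases rs with
  | nil => simp [process_complaint_daily_stat_py, process_complaint_daily_stat_py_alt, pvRuns,
      PySem.Dict.empty]
  | cons r0 rest =>
    simp only [process_complaint_daily_stat_py, process_complaint_daily_stat_py_alt]
    rw [pvFoldA_eq _ _ _ _ (PySem.Dict.getD_insert_self _ _ _ _)]
    have hb : (pvKey r0 == pvKey r0) = true := by simp
    simp only [List.takeWhile_cons, List.dropWhile_cons, hb, if_true]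
    rw [pvRuns, List.length_cons]
    simp only [List.foldl_cons, PySem.Dict.insert_insert_self]
    congr 5
    push_cast
    ring

-- ===== VERDICT (by name: the statement is the Claim_ definition above) =====
theorem process_complaint_daily_stat_py_spec : Claim_equal_process_complaint_daily_stat_py := by
  intro rs _ _
  exact process_complaint_daily_stat_py_eq_alt rs
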